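-- pv_equiv track=rewrite | github.com/shining-ai/leetcode | dairy_question/Array/2570. Merge Two 2D Arrays by Summing Values/level_1.py | mergeArrays
-- ===== SOURCE A (Python) =====
-- from typing import List
--
-- def mergeArrays(nums1: List[List[int]], nums2: List[List[int]]) -> List[List[int]]:
--     merge_nums = []
--     index1 = 0
--     index2 = 0
--     while index1 < len(nums1) and index2 < len(nums2):
--         id1, val1 = nums1[index1]
--         id2, val2 = nums2[index2]
--         if id1 == id2:
--             merge_nums.append([id1, val1 + val2])
--             index1 += 1
--             index2 += 1
--         elif id1 < id2:
--             merge_nums.append([id1, val1])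
--             index1 += 1
--         else:
--             merge_nums.append([id2, val2])
--             index2 += 1
--
--     for remain in nums1[index1:]:
--         merge_nums.append(remain)
--     for remain in nums2[index2:]:
--         merge_nums.append(remain)
--     return merge_nums
-- ===== SOURCE B (Python) =====
-- from typing import List
--
-- def mergeArrays(nums1: List[List[int]], nums2: List[List[int]]) -> List[List[int]]:
--     if not nums1 or not nums2:
--         return nums1 + nums2
--     (id1, val1), (id2, val2) = nums1[0], nums2[0]
--     if id1 == id2:
--         return [[id1, val1 + val2]] + mergeArrays(nums1[1:], nums2[1:])
--     if id1 < id2: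
--         return [[id1, val1]] + mergeArrays(nums1[1:], nums2)
--     return [[id2, val2]] + mergeArrays(nums1, nums2[1:])
-- ===== Notes on version B (the rewrite author's own statement) =====
-- stated objective: simpler
-- what changed: The while-loop over two index counters plus the two tail-copy loops is replaced by a direct structural recursion on the two lists: the base case returns nums1 + nums2 and each step emits one merged head row, removing all index bookkeeping and slicing of tails.
-- outside the precondition, e.g. on mergeArrays([[1, 2], [5]], [[1, 3]]): A returns [[1, 5], [5]], B returns [[1, 5], [5]]
import Mathlib
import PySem

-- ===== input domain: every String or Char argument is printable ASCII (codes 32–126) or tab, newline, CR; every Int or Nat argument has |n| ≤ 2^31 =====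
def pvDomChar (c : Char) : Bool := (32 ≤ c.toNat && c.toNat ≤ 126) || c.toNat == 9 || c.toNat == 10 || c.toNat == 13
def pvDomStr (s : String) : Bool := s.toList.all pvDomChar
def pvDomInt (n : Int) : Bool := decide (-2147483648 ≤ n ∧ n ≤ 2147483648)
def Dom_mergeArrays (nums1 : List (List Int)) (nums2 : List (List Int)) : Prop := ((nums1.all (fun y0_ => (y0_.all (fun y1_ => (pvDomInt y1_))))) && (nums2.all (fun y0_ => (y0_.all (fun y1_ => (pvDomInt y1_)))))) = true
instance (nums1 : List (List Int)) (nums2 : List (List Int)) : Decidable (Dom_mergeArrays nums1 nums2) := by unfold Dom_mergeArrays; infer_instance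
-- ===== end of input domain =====

-- B replaces A's two-index while loop plus tail-copy loops by a direct structural recursion
-- on the two lists (objective: simpler); return values agree on Pre_, proved below.


-- ===== PORT A =====
-- the while loop: index1/index2 walk; 'id1, val1 = nums1[index1]' is row.getD 0 0 / row.getD 1 0
-- (exact under Pre_, where every unpacked row has length 2); the final two for-loops append
-- nums1[index1:] and nums2[index2:], which for 0 ≤ index is List.drop.
def mergeArraysLoop (nums1 : List (List Int)) (nums2 : List (List Int)) (fuel : Nat)
    (merge_nums : List (List Int)) (index1 index2 : Nat) : List (List Int) :=
  match fuel with
  | 0 => merge_nums ++ nums1.drop index1 ++ nums2.drop index2   -- never reached: fuel covers the loop's decreasing measure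
  | fuel + 1 =>
  if index1 < nums1.length ∧ index2 < nums2.length then
    let row1 := nums1.getD index1 []
    let row2 := nums2.getD index2 []
    let id1 := row1.getD 0 0
    let val1 := row1.getD 1 0
    let id2 := row2.getD 0 0
    let val2 := row2.getD 1 0
    if id1 = id2 then
      mergeArraysLoop nums1 nums2 fuel (merge_nums ++ [[id1, val1 + val2]]) (index1 + 1) (index2 + 1)
    else if id1 < id2 then
      mergeArraysLoop nums1 nums2 fuel (merge_nums ++ [[id1, val1]]) (index1 + 1) index2
    else
      mergeArraysLoop nums1 nums2 fuel (merge_nums ++ [[id2, val2]]) index1 (index2 + 1)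
  else
    merge_nums ++ nums1.drop index1 ++ nums2.drop index2

def mergeArrays (nums1 : List (List Int)) (nums2 : List (List Int)) : List (List Int) :=
  mergeArraysLoop nums1 nums2 (nums1.length + nums2.length) [] 0 0

-- ===== PORT B =====
-- structural recursion of Source B: '(id1, val1), (id2, val2) = nums1[0], nums2[0]' is getD as above
def mergeArrays_alt (nums1 : List (List Int)) (nums2 : List (List Int)) : List (List Int) :=
  match nums1, nums2 with
  | [], ys => [] ++ ys                    -- 'return nums1 + nums2'
  | xs, [] => xs ++ []
  | r1 :: xs, r2 :: ys =>
    let id1 := r1.getD 0 0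
    let val1 := r1.getD 1 0
    let id2 := r2.getD 0 0
    let val2 := r2.getD 1 0
    if id1 = id2 then [id1, val1 + val2] :: mergeArrays_alt xs ys
    else if id1 < id2 then [id1, val1] :: mergeArrays_alt xs (r2 :: ys)
    else [id2, val2] :: mergeArrays_alt (r1 :: xs) ys

-- ===== PRECONDITION & SPEC =====
-- Pre_ excludes the inputs on which the Python walk unpacks a row whose length is not 2
-- (ValueError); when one list is empty no row is ever unpacked, so such inputs stay admitted.
-- It conservatively also excludes a few inputs where every non-pair row sits in an unreached
-- tail so A still returns; both programs return the same value there (see cites).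
def Pre_mergeArrays (nums1 : List (List Int)) (nums2 : List (List Int)) : Prop :=
  nums1 = [] ∨ nums2 = [] ∨ ((∀ r ∈ nums1, r.length = 2) ∧ (∀ r ∈ nums2, r.length = 2))
instance (nums1 : List (List Int)) (nums2 : List (List Int)) : Decidable (Pre_mergeArrays nums1 nums2) := by unfold Pre_mergeArrays; infer_instance

def pvWitness_mergeArrays : List (List Int) × List (List Int) :=
  ([[1, 2], [3, 4]], [[2, 5], [3, 1]])

def Spec_mergeArrays (nums1 : List (List Int)) (nums2 : List (List Int)) (out : List (List Int)) : Prop := out = mergeArrays_alt nums1 nums2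
instance (nums1 : List (List Int)) (nums2 : List (List Int)) (out : List (List Int)) : Decidable (Spec_mergeArrays nums1 nums2 out) := by unfold Spec_mergeArrays; infer_instance

-- ===== CLAIM (what is proved, stated in full; the proofs are below) =====
def Claim_equal_mergeArrays : Prop := ∀ (nums1 : List (List Int)) (nums2 : List (List Int)), Dom_mergeArrays nums1 nums2 → Pre_mergeArrays nums1 nums2 → Spec_mergeArrays nums1 nums2 (mergeArrays nums1 nums2)

-- ===== LEMMAS AND PROOFS =====

-- loop invariant: with enough fuel, the loop at (index1, index2) computes acc ++ B's merge of
-- the two remaining suffixes.  (This needs no row-shape hypothesis: both ports read the same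
-- rows with the same getD defaults.)
theorem mergeArraysLoop_eq_alt (nums1 nums2 : List (List Int)) :
    ∀ fuel index1 index2 acc,
      (nums1.length - index1) + (nums2.length - index2) ≤ fuel →
      mergeArraysLoop nums1 nums2 fuel acc index1 index2
        = acc ++ mergeArrays_alt (nums1.drop index1) (nums2.drop index2) := by
  intro fuel
  induction fuel with
  | zero =>
    intro i1 i2 acc hf
    have h1 : nums1.length ≤ i1 := by omega
    have h2 : nums2.length ≤ i2 := by omega
    rw [mergeArraysLoop, List.drop_eq_nil_of_le h1, List.drop_eq_nil_of_le h2]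
    simp [mergeArrays_alt]
  | succ fuel ih =>
    intro i1 i2 acc hf
    rw [mergeArraysLoop]
    by_cases hlt : i1 < nums1.length ∧ i2 < nums2.length
    · have h1 := hlt.1
      have h2 := hlt.2
      have d1 : nums1.drop i1 = nums1[i1] :: nums1.drop (i1 + 1) :=
        List.drop_eq_getElem_cons h1
      have d2 : nums2.drop i2 = nums2[i2] :: nums2.drop (i2 + 1) :=
        List.drop_eq_getElem_cons h2
      rw [if_pos hlt]
      simp only [List.getD_eq_getElem _ _ h1, List.getD_eq_getElem _ _ h2,
        d1, d2, mergeArrays_alt]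
      split_ifs
      · rw [ih _ _ _ (by omega), List.append_assoc]; simp
      · rw [ih _ _ _ (by omega), List.append_assoc]; simp [← d2]
      · rw [ih _ _ _ (by omega), List.append_assoc]; simp [← d1]
    · rw [if_neg hlt]
      rcases Nat.lt_or_ge i1 nums1.length with h1 | h1
      · have h2 : nums2.length ≤ i2 := by omega
        rw [List.drop_eq_nil_of_le h2]
        cases hd : nums1.drop i1 <;> simp [mergeArrays_alt]
      · rw [List.drop_eq_nil_of_le h1]
        simp [mergeArrays_alt]

-- ===== VERDICT (by name: the statement is the Claim_ definition above) =====
theorem mergeArrays_spec : Claim_equal_mergeArrays := by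
  intro nums1 nums2 _ _
  unfold Spec_mergeArrays mergeArrays
  simpa using mergeArraysLoop_eq_alt nums1 nums2 (nums1.length + nums2.length) 0 0 [] (by omega)
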